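-- pv_equiv track=rewrite | github.com/jamalakhov/python-course | Task25.py | track_character_occurrences
-- ===== SOURCE A (Python) =====
-- def track_character_occurrences(string):
--     occurrences = {}
--     result = []
--     words = string.split()
--
--     for word in words:
--         if word not in occurrences:
--             occurrences[word] = 0
--         occurrences[word] += 1
--
--         if occurrences[word] > 1:
--             result.append(f"{word}_{occurrences[word] - 1}")
--         else:
--             result.append(word)
--
--     return ' '.join(result)
-- ===== SOURCE B (Python) =====
-- def track_character_occurrences(string):
--     words = string.split()
--     labeled = []
--     for w in dict.fromkeys(words):
--         positions = [i for i, x in enumerate(words) if x == w]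
--         for k, i in enumerate(positions):
--             labeled.append((i, w if k == 0 else f"{w}_{k}"))
--     labeled.sort(key=lambda p: p[0])
--     return ' '.join(lab for _, lab in labeled)
-- ===== Notes on version B (the rewrite author's own statement) =====
-- stated objective: alternative
-- what changed: Replaces the single left-to-right pass with a running dict by a group-and-scatter algorithm: for each distinct word collect all its positions, label the k-th occurrence word_k (first one plain), then reassemble the sentence by sorting the (position, label) pairs on position.
import Mathlib
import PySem

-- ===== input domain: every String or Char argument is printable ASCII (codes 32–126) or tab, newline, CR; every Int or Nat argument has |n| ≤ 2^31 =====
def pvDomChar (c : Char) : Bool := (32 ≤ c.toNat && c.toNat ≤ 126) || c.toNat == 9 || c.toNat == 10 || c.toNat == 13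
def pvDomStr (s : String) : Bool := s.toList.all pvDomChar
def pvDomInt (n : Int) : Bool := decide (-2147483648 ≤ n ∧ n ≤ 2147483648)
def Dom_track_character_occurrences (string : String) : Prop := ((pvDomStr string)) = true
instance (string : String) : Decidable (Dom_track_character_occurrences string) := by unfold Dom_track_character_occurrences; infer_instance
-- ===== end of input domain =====

-- B replaces A's running-dict single pass by group-and-scatter: per distinct word collect
-- its positions, label the k-th occurrence, reassemble by sorting pairs on position; not faster.

-- ===== PORT A =====
-- loop body of A (the dict update and the append), kept as a named step function
def pvStepA (st : PySem.Dict String Int × List String) (word : String) :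
    PySem.Dict String Int × List String :=
  let occ0 := if st.1.contains word then st.1 else st.1.insert word (0 : Int)
  let occ := occ0.insert word (occ0.getD word 0 + 1)
  if occ.getD word 0 > 1 then
    (occ, st.2 ++ [word ++ "_" ++ PySem.Int.toStr (occ.getD word 0 - 1)])
  else
    (occ, st.2 ++ [word])

def track_character_occurrences (string : String) : String :=
  let words := PySem.Str.split₀ string
  let st := words.foldl pvStepA (PySem.Dict.empty, [])
  PySem.Str.join " " st.2

-- ===== PORT B =====
-- inner loop of B for one distinct word w: its positions, enumerated and labelled
def pvGroup (words : List String) (w : String) : List (Int × String) :=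
  let positions := ((PySem.List.enumerate words).filter (fun p => p.2 == w)).map Prod.fst
  (PySem.List.enumerate positions).map (fun q =>
    (q.2, if q.1 == 0 then w else w ++ "_" ++ PySem.Int.toStr q.1))

def track_character_occurrences_alt (string : String) : String :=
  let words := PySem.Str.split₀ string
  let labeled := (PySem.List.dedup words).foldl (fun acc w => acc ++ pvGroup words w) []
  PySem.Str.join " " ((PySem.List.sorted labeled (fun p => p.1)).map Prod.snd)

-- ===== PRECONDITION & SPEC =====
def Spec_track_character_occurrences (string : String) (out : String) : Prop := out = track_character_occurrences_alt string
instance (string : String) (out : String) : Decidable (Spec_track_character_occurrences string out) := by unfold Spec_track_character_occurrences; infer_instance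

-- ===== CLAIM (what is proved, stated in full; the proofs are below) =====
def Claim_equal_track_character_occurrences : Prop := ∀ (string : String), Dom_track_character_occurrences string → Spec_track_character_occurrences string (track_character_occurrences string)

-- ===== LEMMAS AND PROOFS =====

-- the word emitted when `pre` are the words already seen
def pvItem (pre : List String) (w : String) : String :=
  if ((pre.count w : Int)) > 0 then w ++ "_" ++ PySem.Int.toStr (pre.count w : Int) else w

-- the common reference output: process `rest` with seen-prefix `pre`
def pvGo : List String → List String → List String
  | _, [] => []
  | pre, w :: rest => pvItem pre w :: pvGo (pre ++ [w]) rest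

-- pair each label with its position, as B's pipeline produces it
def pvF (words : List String) (p : Int × String) : Int × String :=
  (p.1, pvItem (words.take p.1.toNat) p.2)

lemma pvStepA_fst_getD (d : PySem.Dict String Int) (w v : String) :
    (if d.contains w then d else d.insert w (0 : Int)).getD v 0 = d.getD v 0 := by
  by_cases h : d.contains w
  · simp [h]
  · rw [if_neg h, PySem.Dict.getD_insert]
    split_ifs with hv
    · subst hv
      exact (PySem.Dict.getD_of_not_contains _ _ (by simpa using h)).symm
    · rfl

lemma pvA_loop (rest : List String) : ∀ (pre : List String) (d : PySem.Dict String Int)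
    (acc : List String), (∀ w, d.getD w 0 = (pre.count w : Int)) →
    (rest.foldl pvStepA (d, acc)).2 = acc ++ pvGo pre rest := by
  induction rest with
  | nil => intro pre d acc _; simp [pvGo]
  | cons w rest ih =>
    intro pre d acc hinv
    have hget : (if d.contains w then d else d.insert w (0 : Int)).getD w 0 = (pre.count w : Int) := by
      rw [pvStepA_fst_getD]; exact hinv w
    have hstep : pvStepA (d, acc) w =
        ((if d.contains w then d else d.insert w (0 : Int)).insert w ((pre.count w : Int) + 1),
          acc ++ [pvItem pre w]) := by
      simp only [pvStepA, hget, PySem.Dict.getD_insert_self, pvItem, add_sub_cancel_right]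
      by_cases hc : ((pre.count w : Int)) > 0
      · rw [if_pos (by omega), if_pos hc]
      · rw [if_neg (by omega), if_neg hc]
    rw [List.foldl_cons, hstep, ih (pre ++ [w]) _ _ ?_]
    · simp [pvGo]
    · intro v
      rw [PySem.Dict.getD_insert]
      by_cases hv : v = w
      · subst hv; simp [List.count_append]
      · simp [hv, pvStepA_fst_getD, hinv v, List.count_append, Ne.symm hv]

-- grouping by value over a nodup key list is a permutation of the original list
lemma pvPartitionPerm : ∀ (ds : List String) (l : List (Int × String)), ds.Nodup →
    (∀ p ∈ l, p.2 ∈ ds) →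
    (ds.flatMap (fun w => l.filter (fun p => p.2 == w))).Perm l := by
  intro ds
  induction ds with
  | nil =>
    intro l _ hmem
    cases l with
    | nil => simp
    | cons p l => exact absurd (hmem p (by simp)) (by simp)
  | cons d rest ih =>
    intro l hnd hmem
    have hdrest : d ∉ rest := (List.nodup_cons.mp hnd).1
    rw [List.flatMap_cons]
    have hrw : ∀ w ∈ rest, l.filter (fun p => p.2 == w)
        = (l.filter (fun p => !(p.2 == d))).filter (fun p => p.2 == w) := by
      intro w hw
      rw [List.filter_filter]
      refine (List.filter_congr ?_)
      intro p _
      by_cases hpw : p.2 = w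
      · have hwd : w ≠ d := by rintro rfl; exact hdrest hw
        simp [hpw, hwd]
      · simp [hpw]
    rw [List.flatMap_congr hrw]
    have hperm2 := ih (l.filter (fun p => !(p.2 == d))) (List.Nodup.of_cons hnd) ?_
    · exact (List.Perm.append_left _ hperm2).trans (List.filter_append_perm (fun p => p.2 == d) l)
    · intro p hp
      have hmem' := hmem p (List.mem_of_mem_filter hp)
      have hne : ¬ (p.2 == d) = true := by simpa using List.of_mem_filter hp
      rcases List.mem_cons.mp hmem' with h | h
      · exact absurd (by simpa using h) hne
      · exact h

-- B's group for w is exactly the w-filtered part of the reference labelling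
lemma pvGroup_eq (words : List String) (w : String) : ∀ (rest pre : List String),
    pre ++ rest = words →
    (PySem.List.enumerate (((PySem.List.enumerate rest (pre.length : Int)).filter
        (fun p => p.2 == w)).map Prod.fst) ((pre.count w : Int))).map (fun q =>
      (q.2, if q.1 == 0 then w else w ++ "_" ++ PySem.Int.toStr q.1))
    = ((PySem.List.enumerate rest (pre.length : Int)).filter (fun p => p.2 == w)).map (pvF words) := by
  intro rest
  induction rest with
  | nil => intro pre _; simp [PySem.List.enumerate_nil]
  | cons x rest ih =>
    intro pre hpre
    rw [PySem.List.enumerate_cons]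
    have h2 : (pre.length : Int) + 1 = ((pre ++ [x]).length : Int) := by
      push_cast [List.length_append, List.length_cons, List.length_nil]; ring
    by_cases hx : x = w
    · subst hx
      rw [List.filter_cons_of_pos (by simp), List.map_cons, PySem.List.enumerate_cons,
        List.map_cons, List.map_cons]
      have hcount : ((pre.count x : Int)) + 1 = (((pre ++ [x]).count x : Int)) := by
        push_cast [List.count_append]; simp
      have hhead : (((pre.length : Int), x) : Int × String).1 = (pre.length : Int) := rfl
      have hheadeq : (((pre.count x : Int) : Int), ((pre.length : Int))).2 = (pre.length : Int) := rfl
      rw [h2, hcount, ih (pre ++ [x]) (by simpa using hpre)]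
      have : ((((pre.count x : Int)), ((pre.length : Int))).2,
          if (((pre.count x : Int)), ((pre.length : Int))).1 == 0 then x
          else x ++ "_" ++ PySem.Int.toStr (((pre.count x : Int)), ((pre.length : Int))).1)
          = pvF words ((pre.length : Int), x) := by
        simp only [pvF, Int.toNat_natCast]
        rw [← hpre, List.take_left]
        unfold pvItem
        by_cases hc : pre.count x = 0
        · simp [hc]
        · have h0 : ¬ (((pre.count x : Int)) == 0) = true := by
            simpa using (by exact_mod_cast hc : ((pre.count x : Int)) ≠ 0)
          rw [if_neg h0, if_pos (by omega)]
      rw [this]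
    · have hcnt : ((pre.count w : Int)) = (((pre ++ [x]).count w : Int)) := by
        push_cast [List.count_append]
        simp [hx]
      rw [List.filter_cons_of_neg (by simpa using fun h => hx h), h2, hcnt,
        ih (pre ++ [x]) (by simpa using hpre)]

-- the reference labelling, projected to labels, is pvGo
lemma pvRef_snd (words : List String) : ∀ (rest pre : List String), pre ++ rest = words →
    ((PySem.List.enumerate rest (pre.length : Int)).map (pvF words)).map Prod.snd = pvGo pre rest := by
  intro rest
  induction rest with
  | nil => intro pre _; simp [pvGo]
  | cons w rest ih =>
    intro pre hpre
    rw [PySem.List.enumerate_cons, List.map_cons, List.map_cons]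
    have hhead : (pvF words ((pre.length : Int), w)).2 = pvItem pre w := by
      simp only [pvF, Int.toNat_natCast]
      rw [← hpre, List.take_left]
    have h2 : (pre.length : Int) + 1 = ((pre ++ [w]).length : Int) := by
      push_cast [List.length_append, List.length_cons, List.length_nil]; ring
    rw [hhead, h2, ih (pre ++ [w]) (by simpa using hpre)]
    simp [pvGo]

-- ===== VERDICT (by name: the statement is the Claim_ definition above) =====
theorem track_character_occurrences_spec : Claim_equal_track_character_occurrences := by
  intro string _
  show track_character_occurrences string = track_character_occurrences_alt string
  have hA : track_character_occurrences string
      = PySem.Str.join " " (pvGo [] (PySem.Str.split₀ string)) := by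
    have h := pvA_loop (PySem.Str.split₀ string) [] PySem.Dict.empty [] (by intro w; simp)
    simp only [List.nil_append] at h
    exact congrArg (PySem.Str.join " ") h
  have hgrp : ∀ w, pvGroup (PySem.Str.split₀ string) w
      = ((PySem.List.enumerate (PySem.Str.split₀ string)).filter (fun p => p.2 == w)).map
          (pvF (PySem.Str.split₀ string)) := by
    intro w
    have h := pvGroup_eq (PySem.Str.split₀ string) w (PySem.Str.split₀ string) [] rfl
    simpa [pvGroup] using h
  have hlab : (PySem.List.dedup (PySem.Str.split₀ string)).foldl
        (fun acc w => acc ++ pvGroup (PySem.Str.split₀ string) w) []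
      = ((PySem.List.dedup (PySem.Str.split₀ string)).flatMap
          (fun w => (PySem.List.enumerate (PySem.Str.split₀ string)).filter (fun p => p.2 == w))).map
          (pvF (PySem.Str.split₀ string)) := by
    rw [PySem.List.foldl_append_eq_flatMap]
    simp only [List.nil_append, List.map_flatMap]
    exact List.flatMap_congr (fun w _ => hgrp w)
  have hperm : (((PySem.List.dedup (PySem.Str.split₀ string)).flatMap
          (fun w => (PySem.List.enumerate (PySem.Str.split₀ string)).filter (fun p => p.2 == w))).map
          (pvF (PySem.Str.split₀ string))).Perm
      ((PySem.List.enumerate (PySem.Str.split₀ string)).map (pvF (PySem.Str.split₀ string))) := by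
    refine List.Perm.map _ (pvPartitionPerm _ _ (PySem.List.nodup_dedup _) ?_)
    intro p hp
    rw [PySem.List.mem_dedup]
    have := PySem.List.map_snd_enumerate (PySem.Str.split₀ string) (0 : Int)
    exact this ▸ List.mem_map_of_mem hp
  have hsorted : PySem.List.sorted ((PySem.List.dedup (PySem.Str.split₀ string)).foldl
        (fun acc w => acc ++ pvGroup (PySem.Str.split₀ string) w) []) (fun p => p.1)
      = (PySem.List.enumerate (PySem.Str.split₀ string)).map (pvF (PySem.Str.split₀ string)) := by
    rw [hlab]
    refine PySem.List.sorted_eq_of_perm_of_pairwise_lt _ _ _ hperm.symm ?_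
    refine List.Pairwise.map _ ?_ (PySem.List.pairwise_lt_enumerate _ _)
    intro a b h
    simpa [pvF] using h
  have hsnd : (((PySem.List.enumerate (PySem.Str.split₀ string)).map
        (pvF (PySem.Str.split₀ string))).map Prod.snd) = pvGo [] (PySem.Str.split₀ string) := by
    have h := pvRef_snd (PySem.Str.split₀ string) (PySem.Str.split₀ string) [] rfl
    simp only [List.length_nil, Nat.cast_zero, List.map_map] at h ⊢
    exact h
  rw [hA]
  show _ = PySem.Str.join " " _
  rw [hsorted, hsnd]
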